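-- pv_equiv track=rewrite | github.com/shatianming5/open-problem-atlas | verifiers/checkers/math/scholz_checker.py | _binary_chain_length
-- ===== SOURCE A (Python) =====
-- def _binary_chain_length(n: int) -> int:
--     """Binary method upper bound for addition chain length."""
--     if n <= 1:
--         return 0
--     length = 0
--     x = n
--     while x > 1:
--         if x % 2 == 1:
--             length += 1
--             x -= 1
--         else:
--             length += 1
--             x //= 2
--     return length
-- ===== SOURCE B (Python) =====
-- def _binary_chain_length(n: int) -> int:
--     """Binary method upper bound for addition chain length."""
--     if n <= 1:
--         return 0
--     return (n.bit_length() - 1) + (bin(n).count("1") - 1)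
-- ===== Notes on version B (the rewrite author's own statement) =====
-- stated objective: simpler
-- what changed: Replaced the halve/decrement while-loop with the closed form (bit_length - 1) + (popcount - 1), no loop at all.
import Mathlib
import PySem

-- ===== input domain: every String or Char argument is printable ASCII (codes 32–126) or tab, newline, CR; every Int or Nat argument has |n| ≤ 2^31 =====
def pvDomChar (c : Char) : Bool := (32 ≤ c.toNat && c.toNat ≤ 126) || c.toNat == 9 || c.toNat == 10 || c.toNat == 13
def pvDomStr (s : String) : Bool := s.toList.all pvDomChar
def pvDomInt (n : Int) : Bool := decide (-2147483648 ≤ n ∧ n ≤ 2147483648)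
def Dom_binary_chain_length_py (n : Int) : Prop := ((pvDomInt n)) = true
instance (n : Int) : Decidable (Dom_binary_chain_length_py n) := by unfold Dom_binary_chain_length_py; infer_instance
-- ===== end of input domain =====

-- B replaces A's halve/decrement loop with the closed form (bit_length - 1) + (popcount - 1): simpler, no loop.

-- ===== PORT A =====
-- the while-loop of A: state (x, length)
def pvLoopA (x length : Int) : Int :=
  if h : 1 < x then
    if PySem.Int.mod x 2 = 1 then pvLoopA (x - 1) (length + 1)
    else pvLoopA (PySem.Int.floordiv x 2) (length + 1)
  else length
termination_by x.toNat
decreasing_by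
  · omega
  · have := PySem.Int.floordiv_eq_ediv_of_pos (a := x) (b := 2) (by omega)
    rw [this]; omega

def binary_chain_length_py (n : Int) : Int :=
  if n ≤ 1 then 0
  else pvLoopA n 0

-- ===== PORT B =====
def binary_chain_length_py_alt (n : Int) : Int :=
  if n ≤ 1 then 0
  else ((PySem.Int.bitLength n : Int) - 1) + ((PySem.Int.bitCount n : Int) - 1)

-- ===== PRECONDITION & SPEC =====
def Spec_binary_chain_length_py (n : Int) (out : Int) : Prop := out = binary_chain_length_py_alt n
instance (n : Int) (out : Int) : Decidable (Spec_binary_chain_length_py n out) := by unfold Spec_binary_chain_length_py; infer_instance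

-- ===== CLAIM (what is proved, stated in full; the proofs are below) =====
def Claim_equal_binary_chain_length_py : Prop := ∀ (n : Int), Dom_binary_chain_length_py n → Spec_binary_chain_length_py n (binary_chain_length_py n)

-- ===== LEMMAS AND PROOFS =====

theorem pvLoopA_closed (m : Nat) : ∀ (x acc : Int), x.toNat = m → 1 < x →
    pvLoopA x acc = acc + (PySem.Int.bitLength x : Int) + (PySem.Int.bitCount x : Int) - 2 := by
  induction m using Nat.strong_induction_on with
  | _ m ih =>
    intro x acc hm hx
    rw [pvLoopA, dif_pos hx]
    have hx0 : 0 < x := by omega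
    have hbl := PySem.Int.bitLength_of_pos (n := x) hx0
    have hbc := PySem.Int.bitCount_of_pos (n := x) hx0
    have hfd : PySem.Int.floordiv x 2 = x / 2 :=
      PySem.Int.floordiv_eq_ediv_of_pos (by omega)
    have hmd : PySem.Int.mod x 2 = x % 2 :=
      PySem.Int.mod_eq_emod_of_pos (by omega)
    by_cases hodd : PySem.Int.mod x 2 = 1
    · rw [if_pos hodd]
      -- x odd, x ≥ 3; step to x - 1 (even, > 1)
      have hx3 : 3 ≤ x := by omega
      have hxo : x % 2 = 1 := by rw [← hmd]; exact hodd
      have h1 : pvLoopA (x - 1) (acc + 1)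
          = (acc + 1) + (PySem.Int.bitLength (x - 1) : Int) + (PySem.Int.bitCount (x - 1) : Int) - 2 := by
        apply ih (x - 1).toNat (by omega) _ _ rfl (by omega)
      rw [h1]
      -- relate bitLength/bitCount of x and x - 1
      have hx10 : 0 < x - 1 := by omega
      have hbl1 := PySem.Int.bitLength_of_pos (n := x - 1) hx10
      have hbc1 := PySem.Int.bitCount_of_pos (n := x - 1) hx10
      have hfd1 : PySem.Int.floordiv (x - 1) 2 = (x - 1) / 2 :=
        PySem.Int.floordiv_eq_ediv_of_pos (by omega)
      have hmd1 : PySem.Int.mod (x - 1) 2 = (x - 1) % 2 :=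
        PySem.Int.mod_eq_emod_of_pos (by omega)
      have hhalf : (x - 1) / 2 = x / 2 := by omega
      have hmod1 : (x - 1) % 2 = 0 := by omega
      rw [hfd1, hhalf] at hbl1 hbc1
      rw [hfd] at hbl; rw [hfd, hmd] at hbc
      rw [hmd1, hmod1] at hbc1
      rw [hbl, hbc, hbl1, hbc1, hxo]
      push_cast
      ring
    · rw [if_neg hodd]
      have hxe : x % 2 = 0 := by omega
      by_cases h2 : x = 2
      · subst h2
        rw [pvLoopA]
        have e1 : PySem.Int.bitLength 2 = 2 := by decide
        have e2 : PySem.Int.bitCount 2 = 1 := by decide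
        have e3 : PySem.Int.floordiv 2 2 = 1 := by decide
        rw [e1, e2, e3, pvLoopA]
        push_cast
        omega
      · -- x ≥ 4 even; step to x / 2 > 1
        have hx4 : 4 ≤ x := by omega
        have hq1 : 1 < x / 2 := by omega
        have h1 : pvLoopA (PySem.Int.floordiv x 2) (acc + 1)
            = (acc + 1) + (PySem.Int.bitLength (x / 2) : Int) + (PySem.Int.bitCount (x / 2) : Int) - 2 := by
          rw [hfd]
          apply ih (x / 2).toNat (by omega) _ _ rfl hq1
        rw [h1]
        rw [hfd] at hbl; rw [hfd, hmd] at hbc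
        rw [hbl, hbc, hxe]
        push_cast
        ring

-- ===== VERDICT (by name: the statement is the Claim_ definition above) =====
theorem binary_chain_length_py_spec : Claim_equal_binary_chain_length_py := by
  intro n _
  unfold Spec_binary_chain_length_py binary_chain_length_py binary_chain_length_py_alt
  by_cases h : n ≤ 1
  · simp [h]
  · rw [if_neg h, if_neg h]
    rw [pvLoopA_closed n.toNat n 0 rfl (by omega)]
    ring
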